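-- pv_equiv track=rewrite | github.com/aqeeeeel/IS-project | IS-project-main/src/server/authentication_service.py | _challenge_variant
-- ===== SOURCE A (Python) =====
-- def _challenge_variant(challenge_vector: list[int], round_index: int) -> list[int]:
--     if not challenge_vector:
--         raise ValueError("challenge_vector must not be empty")
--
--     width = len(challenge_vector)
--     rotation = round_index % width
--     rotated = challenge_vector[rotation:] + challenge_vector[:rotation]
--     if ((round_index // width) % 2) == 1:
--         return [1 - bit for bit in rotated]
--     return rotated
-- ===== SOURCE B (Python) =====
-- def _reverse_segment(buf: list[int], i: int, j: int) -> None: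
--     """Reverse buf[i..j] (inclusive) in place with a two-pointer swap loop."""
--     while i < j:
--         buf[i], buf[j] = buf[j], buf[i]
--         i += 1
--         j -= 1
--
--
-- def _challenge_variant(challenge_vector: list[int], round_index: int) -> list[int]:
--     if not challenge_vector:
--         raise ValueError("challenge_vector must not be empty")
--
--     width = len(challenge_vector)
--     rotation = round_index % width
--     # three-reversal rotation: reverse the first `rotation` elements, then the
--     # rest, then the whole buffer -- this is the left rotation by `rotation`
--     out = list(challenge_vector)
--     _reverse_segment(out, 0, rotation - 1)
--     _reverse_segment(out, rotation, width - 1)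
--     _reverse_segment(out, 0, width - 1)
--     if ((round_index // width) % 2) == 1:
--         return [1 - bit for bit in out]
--     return out
-- ===== Notes on version B (the rewrite author's own statement) =====
-- stated objective: alternative
-- what changed: Replaces A's slice-and-concatenate rotation with the classic in-place three-reversal rotation algorithm (reverse the first `rotation` elements, reverse the rest, reverse the whole buffer, each with an explicit two-pointer swap loop) on a mutable copy; the optional inversion pass stays.
import Mathlib
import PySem

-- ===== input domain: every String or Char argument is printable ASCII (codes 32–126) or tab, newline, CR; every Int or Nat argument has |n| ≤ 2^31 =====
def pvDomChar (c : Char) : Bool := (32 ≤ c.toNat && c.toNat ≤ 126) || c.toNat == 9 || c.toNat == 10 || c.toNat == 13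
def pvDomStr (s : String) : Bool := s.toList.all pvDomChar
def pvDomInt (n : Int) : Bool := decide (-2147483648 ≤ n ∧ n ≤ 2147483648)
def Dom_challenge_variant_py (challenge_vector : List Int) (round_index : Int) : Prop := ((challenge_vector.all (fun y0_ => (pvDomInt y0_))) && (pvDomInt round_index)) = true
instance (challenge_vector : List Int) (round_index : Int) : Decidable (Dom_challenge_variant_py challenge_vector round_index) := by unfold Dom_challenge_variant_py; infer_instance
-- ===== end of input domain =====

-- B rotates a mutable copy by the classic three-reversal algorithm (two-pointer
-- swap loops) instead of A's slice-and-concatenate rotation (objective: alternative).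

-- ===== PORT A =====
def challenge_variant_py (challenge_vector : List Int) (round_index : Int) : List Int :=
  -- 'if not challenge_vector: raise ValueError(...)' — those inputs are outside Pre_; [] is a placeholder
  if challenge_vector = [] then []
  else
    let width : Int := (challenge_vector.length : Int)
    let rotation := PySem.Int.mod round_index width
    let rotated := PySem.List.slice challenge_vector (some rotation) none ++
                   PySem.List.slice challenge_vector none (some rotation)
    if PySem.Int.mod (PySem.Int.floordiv round_index width) 2 = 1 then
      rotated.map (fun bit => 1 - bit)
    else rotated

-- ===== PORT B =====
-- _reverse_segment: 'while i < j: buf[i], buf[j] = buf[j], buf[i]; i += 1; j -= 1'.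
-- B only calls it with 0 ≤ i and j < len(buf), so every index the loop touches is in
-- range and List.getD/List.set are exact for Python's buf[i] read/write there.
def pvRevLoop (buf : List Int) (i j : Int) : List Int :=
  if _h : i < j then
    pvRevLoop ((buf.set i.toNat (buf.getD j.toNat 0)).set j.toNat (buf.getD i.toNat 0))
      (i + 1) (j - 1)
  else buf
termination_by (j - i).toNat
decreasing_by omega

def challenge_variant_py_alt (challenge_vector : List Int) (round_index : Int) : List Int :=
  -- 'raise ValueError' on the empty vector is outside Pre_; [] is a placeholder
  if challenge_vector = [] then []
  else
    let width : Int := (challenge_vector.length : Int)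
    let rotation := PySem.Int.mod round_index width
    let out := challenge_vector  -- out = list(challenge_vector)
    let out := pvRevLoop out 0 (rotation - 1)
    let out := pvRevLoop out rotation (width - 1)
    let out := pvRevLoop out 0 (width - 1)
    if PySem.Int.mod (PySem.Int.floordiv round_index width) 2 = 1 then
      out.map (fun bit => 1 - bit)
    else out

-- ===== PRECONDITION & SPEC =====
-- Pre_ excludes exactly the empty vector, on which both A and B raise ValueError.
def Pre_challenge_variant_py (challenge_vector : List Int) (round_index : Int) : Prop :=
  challenge_vector ≠ []
instance (challenge_vector : List Int) (round_index : Int) : Decidable (Pre_challenge_variant_py challenge_vector round_index) := by unfold Pre_challenge_variant_py; infer_instance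

def pvWitness_challenge_variant_py : List Int × Int := ([1, 0, 1], 5)

def Spec_challenge_variant_py (challenge_vector : List Int) (round_index : Int) (out : List Int) : Prop := out = challenge_variant_py_alt challenge_vector round_index
instance (challenge_vector : List Int) (round_index : Int) (out : List Int) : Decidable (Spec_challenge_variant_py challenge_vector round_index out) := by unfold Spec_challenge_variant_py; infer_instance

-- ===== CLAIM (what is proved, stated in full; the proofs are below) =====
def Claim_equal_challenge_variant_py : Prop := ∀ (challenge_vector : List Int) (round_index : Int), Dom_challenge_variant_py challenge_vector round_index → Pre_challenge_variant_py challenge_vector round_index → Spec_challenge_variant_py challenge_vector round_index (challenge_variant_py challenge_vector round_index)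

-- ===== LEMMAS AND PROOFS =====

lemma pvRevLoop_length (buf : List Int) (i j : Int) :
    (pvRevLoop buf i j).length = buf.length := by
  induction buf, i, j using pvRevLoop.induct with
  | case1 buf i j h ih => rw [pvRevLoop]; simp [h] at ih ⊢; omega
  | case2 buf i j h => rw [pvRevLoop]; simp [h]

-- the swap loop reverses the segment [i, j]: element k of the result is element
-- i + j - k of the input inside the segment, unchanged outside it
lemma pvRevLoop_getElem? : ∀ (buf : List Int) (i j : Int), 0 ≤ i →
    j < (buf.length : Int) → ∀ k : Nat,
    (pvRevLoop buf i j)[k]? =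
      if i ≤ (k : Int) ∧ (k : Int) ≤ j then buf[(i + j - k).toNat]? else buf[k]? := by
  intro buf i j
  induction buf, i, j using pvRevLoop.induct with
  | case2 buf i j h =>
      intro h0 hj k
      rw [pvRevLoop]; simp only [h, dite_false]
      split_ifs with hc
      · have : (i + j - k).toNat = k := by omega
        rw [this]
      · rfl
  | case1 buf i j h ih =>
      intro h0 hj k
      rw [pvRevLoop]; simp only [h, dite_true]
      have hlen : i.toNat < buf.length := by omega
      have hjlen : j.toNat < buf.length := by omega
      set buf' := (buf.set i.toNat (buf.getD j.toNat 0)).set j.toNat (buf.getD i.toNat 0) with hb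
      have hlen' : buf'.length = buf.length := by simp [hb]
      have hchar : ∀ m : Nat, buf'[m]? =
          if m = j.toNat then some (buf.getD i.toNat 0)
          else if m = i.toNat then some (buf.getD j.toNat 0)
          else buf[m]? := by
        intro m
        rw [hb, List.getElem?_set_of_lt' _ _ (by simpa using hjlen),
            List.getElem?_set_of_lt' _ _ hlen]
        split_ifs <;> first | rfl | omega
      have hgi : buf[i.toNat]? = some (buf.getD i.toNat 0) := by
        rw [List.getElem?_eq_getElem hlen, List.getD_eq_getElem buf 0 hlen]
      have hgj : buf[j.toNat]? = some (buf.getD j.toNat 0) := by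
        rw [List.getElem?_eq_getElem hjlen, List.getD_eq_getElem buf 0 hjlen]
      rw [ih (by omega) (by rw [hlen']; exact_mod_cast (by omega : j - 1 < (buf.length : Int))) k]
      by_cases hk1 : (k : Int) < i
      · rw [if_neg (by omega), if_neg (by omega), hchar, if_neg (by omega), if_neg (by omega)]
      · by_cases hk2 : (j : Int) < k
        · rw [if_neg (by omega), if_neg (by omega), hchar, if_neg (by omega), if_neg (by omega)]
        · rw [if_pos (by omega : (i : Int) ≤ k ∧ (k : Int) ≤ j)]
          by_cases hki : k = i.toNat
          · rw [if_neg (by omega), hchar, if_neg (by omega), if_pos hki]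
            have : (i + j - k).toNat = j.toNat := by omega
            rw [this, hgj]
          · by_cases hkj : k = j.toNat
            · rw [if_neg (by omega), hchar, if_pos hkj]
              have : (i + j - k).toNat = i.toNat := by omega
              rw [this, hgi]
            · rw [if_pos (by omega : (i : Int) + 1 ≤ k ∧ (k : Int) ≤ j - 1)]
              have harg : i + 1 + (j - 1) - k = i + j - k := by ring
              rw [harg, hchar, if_neg (by omega), if_neg (by omega)]

-- the three reversals are the left rotation by r
lemma three_rev (cv : List Int) (r : Nat) (hr : r ≤ cv.length) :
    pvRevLoop (pvRevLoop (pvRevLoop cv 0 ((r : Int) - 1)) (r : Int) ((cv.length : Int) - 1))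
      0 ((cv.length : Int) - 1) = cv.drop r ++ cv.take r := by
  set n := cv.length with hn
  set b1 := pvRevLoop cv 0 ((r : Int) - 1) with hb1
  set b2 := pvRevLoop b1 (r : Int) ((n : Int) - 1) with hb2
  have hl1 : b1.length = n := pvRevLoop_length ..
  have hl2 : b2.length = n := by rw [hb2, pvRevLoop_length, hl1]
  apply List.ext_getElem?
  intro k
  have g1 : ∀ m : Nat, b1[m]? =
      if (0 : Int) ≤ m ∧ (m : Int) ≤ (r : Int) - 1 then cv[((r : Int) - 1 - m).toNat]? else cv[m]? := by
    intro m
    have := pvRevLoop_getElem? cv 0 ((r : Int) - 1) le_rfl (by omega) m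
    simpa using this
  have g2 : ∀ m : Nat, b2[m]? =
      if (r : Int) ≤ m ∧ (m : Int) ≤ (n : Int) - 1 then b1[((r : Int) + ((n : Int) - 1) - m).toNat]? else b1[m]? := by
    intro m
    exact pvRevLoop_getElem? b1 (r : Int) ((n : Int) - 1) (by omega) (by rw [hl1]; exact_mod_cast (by omega : (n:Int) - 1 < (n:Int))) m
  have g3 : (pvRevLoop b2 0 ((n : Int) - 1))[k]? =
      if (0 : Int) ≤ k ∧ (k : Int) ≤ (n : Int) - 1 then b2[((n : Int) - 1 - k).toNat]? else b2[k]? := by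
    have := pvRevLoop_getElem? b2 0 ((n : Int) - 1) le_rfl (by rw [hl2]; omega) k
    simpa using this
  rw [g3]
  by_cases hk : k < n
  · rw [if_pos (by constructor <;> omega)]
    have hm1 : ((n : Int) - 1 - k).toNat = n - 1 - k := by omega
    rw [hm1, g2]
    by_cases hc : k < n - r
    · -- lands in the (reversed) suffix: result element k is cv[r + k]
      rw [if_pos (by constructor <;> omega)]
      have hm2 : ((r : Int) + ((n : Int) - 1) - ((n : Nat) - 1 - k : Nat)).toNat = r + k := by omega
      rw [hm2, g1, if_neg (by omega)]
      rw [List.getElem?_append_left (by simp [List.length_drop]; omega),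
          List.getElem?_drop]
    · -- lands in the (reversed) prefix: result element k is cv[k + r - n]
      rw [if_neg (by omega), g1, if_pos (by constructor <;> omega)]
      have hm3 : ((r : Int) - 1 - ((n : Nat) - 1 - k : Nat)).toNat = k - (n - r) := by omega
      rw [hm3,
          List.getElem?_append_right (by simp [List.length_drop]; omega)]
      simp only [List.length_drop, List.getElem?_take]
      rw [if_pos (by omega : k - (cv.length - r) < r)]
  · rw [if_neg (by omega), g2, if_neg (by omega), g1, if_neg (by omega)]
    have h1 : cv[k]? = none := List.getElem?_eq_none (by omega)
    have h2 : (cv.drop r ++ cv.take r)[k]? = none := List.getElem?_eq_none (by simp; omega)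
    rw [h1, h2]

lemma main_eq (cv : List Int) (ri : Int) (hpre : cv ≠ []) :
    challenge_variant_py cv ri = challenge_variant_py_alt cv ri := by
  have hn : 0 < cv.length := List.length_pos_of_ne_nil hpre
  have hw : (0 : Int) < (cv.length : Int) := by exact_mod_cast hn
  have h0 : 0 ≤ PySem.Int.mod ri (cv.length : Int) := PySem.Int.mod_nonneg _ hw
  have hlt : PySem.Int.mod ri (cv.length : Int) < (cv.length : Int) :=
    PySem.Int.mod_lt _ hw
  have hcast : PySem.Int.mod ri (cv.length : Int)
      = (((PySem.Int.mod ri (cv.length : Int)).toNat : Nat) : Int) :=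
    (Int.toNat_of_nonneg h0).symm
  have hrot := three_rev cv (PySem.Int.mod ri (cv.length : Int)).toNat (by omega)
  rw [← hcast] at hrot
  simp only [challenge_variant_py, challenge_variant_py_alt, if_neg hpre,
    PySem.List.slice_from cv h0, PySem.List.slice_to cv h0, hrot]

-- ===== VERDICT (by name: the statement is the Claim_ definition above) =====
theorem challenge_variant_py_spec : Claim_equal_challenge_variant_py := by
  intro cv ri _ hpre
  unfold Spec_challenge_variant_py
  exact main_eq cv ri hpre
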